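-- pv_equiv track=rewrite | github.com/Lv296TAQC/python_tasks | tasks/task5_exercise568.py | single_solution
-- ===== SOURCE A (Python) =====
-- def find_subset(id_):
--     """Evaluate subset for given id
--
--         Args:
--             id_ (int): Number(id) of subset in ternary numeral system,
--                 e.g. '5' - 00000012 - "1234567+8-9"
--
--         Returns:
--             int: Evaluated number in decimal numeral system which represents evaluated subset
--
--     """
--
--     result = 0
--     l_bound = 0
--     operation = 1
--     for i in range(1, 10):
--         l_bound = l_bound * 10 + i
--         if id_ % 3 != 0:
--             if operation == 2:
--                 result -= l_bound
--             else:
--                 result += l_bound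
--             l_bound = 0
--             operation = id_ % 3
--         id_ //= 3
--
--     if operation == 2:
--         result -= l_bound
--     else:
--         result += l_bound
--     return result
--
-- def single_solution(natural):
--     """Find single solution for given number
--
--         Args:
--             natural (int): Any given integer (natural) number
--
--         Returns:
--             str: String that represents first founded solution (equation) or message that it
--                 is impossible to generate such equation
--
--     """
--     lists = ""
--     for i in range(6561):
--         calculated_value = find_subset(i)
--         if calculated_value == natural:
--             for j in range(1, 9):
--                 lists += "{}".format(j)
--                 lists += ("" if i % 3 == 0 else "+" if i % 3 == 1 else "-")
--                 i //= 3
--             lists += "9"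
--             return lists
--     return "No possible solutions"
-- ===== SOURCE B (Python) =====
-- OPS = ["", "+", "-"]
--
-- def _eval_expr(expr):
--     # evaluate a '+'/'-' chain of decimal literals, scanning characters once
--     total, cur, sign = 0, 0, 1
--     for c in expr:
--         if c == '+':
--             total += sign * cur
--             cur, sign = 0, 1
--         elif c == '-':
--             total += sign * cur
--             cur, sign = 0, -1
--         else:
--             cur = cur * 10 + (ord(c) - 48)
--     return total + sign * cur
--
-- def single_solution(natural):
--     for i in range(6561):
--         expr = "".join(str(j) + OPS[(i // 3 ** (j - 1)) % 3] for j in range(1, 9)) + "9"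
--         if _eval_expr(expr) == natural:
--             return expr
--     return "No possible solutions"
-- ===== Notes on version B (the rewrite author's own statement) =====
-- stated objective: alternative
-- what changed: B drops find_subset's accumulator arithmetic entirely: for each candidate id it builds the equation string up front by closed-form extraction of the id's ternary op-digits and tests it by evaluating the string itself with a single-pass character parser, returning the string on the first match.
import Mathlib
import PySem

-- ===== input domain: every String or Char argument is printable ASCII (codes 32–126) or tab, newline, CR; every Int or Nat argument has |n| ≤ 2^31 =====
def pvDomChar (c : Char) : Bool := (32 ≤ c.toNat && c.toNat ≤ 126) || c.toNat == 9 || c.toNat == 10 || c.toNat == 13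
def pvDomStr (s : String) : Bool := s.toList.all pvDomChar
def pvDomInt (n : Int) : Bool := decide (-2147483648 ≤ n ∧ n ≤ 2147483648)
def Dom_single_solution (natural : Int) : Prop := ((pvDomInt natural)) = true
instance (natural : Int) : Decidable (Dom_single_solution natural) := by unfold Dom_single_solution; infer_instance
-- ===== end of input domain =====

-- B drops A's find_subset arithmetic: it builds each candidate equation string up front by
-- closed-form ternary digit extraction and evaluates the string itself (a ported eval).

-- ===== PORT A =====
-- body of A's 'for i in range(1, 10)' loop in find_subset; state (result, l_bound, operation, id_)
def pvStepA (st : Int × Int × Int × Int) (i : Int) : Int × Int × Int × Int :=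
  match st with
  | (result, l_bound, operation, id_) =>
    let l_bound := l_bound * 10 + i
    if PySem.Int.mod id_ 3 ≠ 0 then
      ((if operation = 2 then result - l_bound else result + l_bound), 0,
        PySem.Int.mod id_ 3, PySem.Int.floordiv id_ 3)
    else
      (result, l_bound, operation, PySem.Int.floordiv id_ 3)

def find_subset (id_ : Int) : Int :=
  match (PySem.List.pyRange 1 10 1).foldl pvStepA (0, 0, 1, id_) with
  | (result, l_bound, operation, _) =>
    if operation = 2 then result - l_bound else result + l_bound

-- body of A's inner 'for j in range(1, 9)' string-building loop; state (lists, i)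
def pvStepBuild (st : String × Int) (j : Int) : String × Int :=
  match st with
  | (lists, i) =>
    let lists := lists ++ PySem.Int.toStr j
    let lists := lists ++ (if PySem.Int.mod i 3 = 0 then "" else if PySem.Int.mod i 3 = 1 then "+" else "-")
    (lists, PySem.Int.floordiv i 3)

def pvBuildA (i : Int) : String :=
  ((PySem.List.pyRange 1 9 1).foldl pvStepBuild ("", i)).1 ++ "9"

-- A's outer 'for i in range(6561)' loop with its early return
def pvLoopA (natural : Int) : List Int → String
  | [] => "No possible solutions"
  | i :: rest =>
    if find_subset i = natural then pvBuildA i else pvLoopA natural rest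

def single_solution (natural : Int) : String :=
  pvLoopA natural (PySem.List.pyRange 0 6561 1)

-- ===== PORT B =====
def pvOPS : List String := ["", "+", "-"]

-- hand port of Python's eval, exact on the '+'/'-' chains of positive decimal integer
-- literals that B feeds it; state (total, current term, sign of current term)
def pvEvalChars : List Char → Int → Int → Int → Int
  | [], total, cur, sign => total + sign * cur
  | c :: rest, total, cur, sign =>
    if c = '+' then pvEvalChars rest (total + sign * cur) 0 1
    else if c = '-' then pvEvalChars rest (total + sign * cur) 0 (-1)
    else pvEvalChars rest total (cur * 10 + ((c.toNat : Int) - 48)) sign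

def pvEval (s : String) : Int := pvEvalChars s.toList 0 0 1

-- candidate equation for id i: digit j then OPS[(i // 3**(j-1)) % 3] for j = 1..8, then "9"
-- (exponent j-1 ≥ 0 on range(1, 9), so '.toNat' is exact for Python's 3 ** (j - 1))
def pvExprB (i : Int) : String :=
  PySem.Str.join "" ((PySem.List.pyRange 1 9 1).map (fun j =>
    PySem.Int.toStr j ++
      PySem.List.pyGetD pvOPS (PySem.Int.mod (PySem.Int.floordiv i ((3 : Int) ^ (j - 1).toNat)) 3) ""))
  ++ "9"

def pvLoopB (natural : Int) : List Int → String
  | [] => "No possible solutions"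
  | i :: rest =>
    let expr := pvExprB i
    if pvEval expr = natural then expr else pvLoopB natural rest

def single_solution_alt (natural : Int) : String :=
  pvLoopB natural (PySem.List.pyRange 0 6561 1)

-- ===== PRECONDITION & SPEC =====
def Spec_single_solution (natural : Int) (out : String) : Prop := out = single_solution_alt natural
instance (natural : Int) (out : String) : Decidable (Spec_single_solution natural out) := by unfold Spec_single_solution; infer_instance

-- ===== CLAIM (what is proved, stated in full; the proofs are below) =====
def Claim_equal_single_solution : Prop := ∀ (natural : Int), Dom_single_solution natural → Spec_single_solution natural (single_solution natural)

-- ===== LEMMAS AND PROOFS =====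

-- common semantics: process (token, op-digit) pairs; state (total, current term, sign)
def pvRun : List (Int × Int) → Int × Int × Int → Int × Int × Int
  | [], st => st
  | (t, d) :: ps, (total, cur, sign) =>
    let cur := cur * 10 + t
    if d = 0 then pvRun ps (total, cur, sign)
    else pvRun ps (total + sign * cur, 0, if d = 1 then 1 else -1)

def pvFin (st : Int × Int × Int) : Int := st.1 + st.2.2 * st.2.1

-- tokens paired with successive base-3 digits of id
def pvPairs : List Int → Int → List (Int × Int)
  | [], _ => []
  | t :: ts, id_ => (t, PySem.Int.mod id_ 3) :: pvPairs ts (PySem.Int.floordiv id_ 3)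

-- character rendering of a pair list
def pvChars : List (Int × Int) → List Char
  | [] => []
  | (t, d) :: ps =>
    PySem.Int.toChars t ++ (if d = 0 then [] else if d = 1 then ['+'] else ['-']) ++ pvChars ps

theorem pvMod3_bounds (x : Int) : 0 ≤ PySem.Int.mod x 3 ∧ PySem.Int.mod x 3 < 3 := by
  rw [PySem.Int.mod_eq_emod_of_pos (by norm_num)]
  exact ⟨Int.emod_nonneg x (by norm_num), Int.emod_lt_of_pos x (by norm_num)⟩

theorem pvFdFd (i a b : Int) (ha : 0 < a) (hb : 0 < b) :
    PySem.Int.floordiv (PySem.Int.floordiv i a) b = PySem.Int.floordiv i (a * b) := by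
  rw [PySem.Int.floordiv_eq_ediv_of_pos ha, PySem.Int.floordiv_eq_ediv_of_pos hb,
    PySem.Int.floordiv_eq_ediv_of_pos (mul_pos ha hb),
    Int.ediv_ediv_of_nonneg (le_of_lt ha)]

theorem pvRun_cons (t d : Int) (ps : List (Int × Int)) (st : Int × Int × Int) :
    pvRun ((t, d) :: ps) st
      = if d = 0 then pvRun ps (st.1, st.2.1 * 10 + t, st.2.2)
        else pvRun ps (st.1 + st.2.2 * (st.2.1 * 10 + t), 0, if d = 1 then 1 else -1) := by
  obtain ⟨a, b, c⟩ := st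
  rfl

-- A's find_subset fold is pvRun followed by the final flush
theorem pvFoldA (toks : List Int) : ∀ (r l op id_ : Int), (op = 1 ∨ op = 2) →
    (match toks.foldl pvStepA (r, l, op, id_) with
     | (r', l', op', _) => if op' = 2 then r' - l' else r' + l')
    = pvFin (pvRun (pvPairs toks id_) (r, l, if op = 2 then -1 else 1)) := by
  induction toks with
  | nil =>
    intro r l op id_ hop
    rcases hop with h | h <;> (simp [pvPairs, pvRun, pvFin, h]; try ring)
  | cons t ts ih =>
    intro r l op id_ hop
    rw [List.foldl_cons]
    have hp : pvPairs (t :: ts) id_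
        = (t, PySem.Int.mod id_ 3) :: pvPairs ts (PySem.Int.floordiv id_ 3) := rfl
    by_cases h : PySem.Int.mod id_ 3 = 0
    · have hs : pvStepA (r, l, op, id_) t = (r, l * 10 + t, op, PySem.Int.floordiv id_ 3) := by
        simp only [pvStepA]
        rw [if_neg (not_not_intro h)]
      rw [hs, ih _ _ _ _ hop, hp, h]
      simp [pvRun]
    · have hd : PySem.Int.mod id_ 3 = 1 ∨ PySem.Int.mod id_ 3 = 2 := by
        have := pvMod3_bounds id_; omega
      have hs : pvStepA (r, l, op, id_) t
          = ((if op = 2 then r - (l * 10 + t) else r + (l * 10 + t)), 0,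
             PySem.Int.mod id_ 3, PySem.Int.floordiv id_ 3) := by
        simp only [pvStepA]
        rw [if_pos h]
      rw [hs, hp]
      rcases hd with hd | hd <;> rcases hop with h1 | h1 <;>
        (rw [hd, h1, ih _ _ _ _ (by norm_num), pvRun_cons]
         norm_num
         try rw [show r + (-t + -(l * 10)) = r - (l * 10 + t) from by ring])

theorem pvDigitChar (t : Int) (h1 : 1 ≤ t) (h2 : t ≤ 9) :
    ∃ c : Char, PySem.Int.toChars t = [c] ∧ c ≠ '+' ∧ c ≠ '-' ∧ ((c.toNat : Int) - 48) = t := by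
  interval_cases t
  · exact ⟨'1', by decide, by decide, by decide, by decide⟩
  · exact ⟨'2', by decide, by decide, by decide, by decide⟩
  · exact ⟨'3', by decide, by decide, by decide, by decide⟩
  · exact ⟨'4', by decide, by decide, by decide, by decide⟩
  · exact ⟨'5', by decide, by decide, by decide, by decide⟩
  · exact ⟨'6', by decide, by decide, by decide, by decide⟩
  · exact ⟨'7', by decide, by decide, by decide, by decide⟩
  · exact ⟨'8', by decide, by decide, by decide, by decide⟩
  · exact ⟨'9', by decide, by decide, by decide, by decide⟩

-- evaluating the rendered string is pvRun followed by the final "9" term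
theorem pvEvalRun (ps : List (Int × Int)) : ∀ (total cur sign : Int),
    (∀ p ∈ ps, (1 ≤ p.1 ∧ p.1 ≤ 9) ∧ (0 ≤ p.2 ∧ p.2 < 3)) →
    pvEvalChars (pvChars ps ++ ['9']) total cur sign
    = (match pvRun ps (total, cur, sign) with | (t, c, s) => t + s * (c * 10 + 9)) := by
  induction ps with
  | nil =>
    intro total cur sign _
    simp [pvChars, pvEvalChars, pvRun]
  | cons p ps ih =>
    intro total cur sign h
    obtain ⟨⟨ht1, ht2⟩, hd0, hd3⟩ := h p (List.mem_cons_self ..)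
    obtain ⟨t, d⟩ := p
    obtain ⟨c, hc, hcp, hcm, hcv⟩ := pvDigitChar t ht1 ht2
    have htail : ∀ p ∈ ps, (1 ≤ p.1 ∧ p.1 ≤ 9) ∧ (0 ≤ p.2 ∧ p.2 < 3) :=
      fun q hq => h q (List.mem_cons_of_mem _ hq)
    simp only at hd0 hd3
    have hd : d = 0 ∨ d = 1 ∨ d = 2 := by omega
    rcases hd with hd | hd | hd <;>
      simp only [pvChars, hd, pvRun, List.append_assoc, List.cons_append, List.nil_append,
        hc, pvEvalChars, hcp, hcm, if_false, hcv, if_true] <;>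
      first
        | exact ih total (cur * 10 + t) sign htail
        | exact ih (total + sign * (cur * 10 + t)) 0 1 htail
        | exact ih (total + sign * (cur * 10 + t)) 0 (-1) htail

theorem pvRunAppend (ps qs : List (Int × Int)) : ∀ st,
    pvRun (ps ++ qs) st = pvRun qs (pvRun ps st) := by
  induction ps with
  | nil => intro st; rfl
  | cons p ps ih =>
    intro st
    obtain ⟨t, d⟩ := p; obtain ⟨a, b, c⟩ := st
    by_cases h : d = 0 <;> simp [pvRun, h, ih]

theorem pvElem (x : Int) :
    (PySem.List.pyGetD pvOPS (PySem.Int.mod x 3) "").toList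
      = (if PySem.Int.mod x 3 = 0 then []
         else if PySem.Int.mod x 3 = 1 then ['+'] else ['-']) := by
  have hb := pvMod3_bounds x
  have hd : PySem.Int.mod x 3 = 0 ∨ PySem.Int.mod x 3 = 1 ∨ PySem.Int.mod x 3 = 2 := by omega
  rcases hd with h | h | h <;> rw [h] <;> decide

theorem pvRange19 : PySem.List.pyRange 1 9 1 = [1, 2, 3, 4, 5, 6, 7, 8] := by decide
theorem pvRange110 : PySem.List.pyRange 1 10 1 = [1, 2, 3, 4, 5, 6, 7, 8, 9] := by decide

-- the iterated-quotient digits of pvPairs, as closed forms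
theorem pvPairs8 (i : Int) :
    pvPairs [1, 2, 3, 4, 5, 6, 7, 8] i =
      [(1, PySem.Int.mod i 3),
       (2, PySem.Int.mod (PySem.Int.floordiv i 3) 3),
       (3, PySem.Int.mod (PySem.Int.floordiv i 9) 3),
       (4, PySem.Int.mod (PySem.Int.floordiv i 27) 3),
       (5, PySem.Int.mod (PySem.Int.floordiv i 81) 3),
       (6, PySem.Int.mod (PySem.Int.floordiv i 243) 3),
       (7, PySem.Int.mod (PySem.Int.floordiv i 729) 3),
       (8, PySem.Int.mod (PySem.Int.floordiv i 2187) 3)] := by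
  have e1 : PySem.Int.floordiv (PySem.Int.floordiv i 3) 3 = PySem.Int.floordiv i 9 := by
    rw [pvFdFd i 3 3 (by norm_num) (by norm_num)]; norm_num
  have e2 : PySem.Int.floordiv (PySem.Int.floordiv i 9) 3 = PySem.Int.floordiv i 27 := by
    rw [pvFdFd i 9 3 (by norm_num) (by norm_num)]; norm_num
  have e3 : PySem.Int.floordiv (PySem.Int.floordiv i 27) 3 = PySem.Int.floordiv i 81 := by
    rw [pvFdFd i 27 3 (by norm_num) (by norm_num)]; norm_num
  have e4 : PySem.Int.floordiv (PySem.Int.floordiv i 81) 3 = PySem.Int.floordiv i 243 := by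
    rw [pvFdFd i 81 3 (by norm_num) (by norm_num)]; norm_num
  have e5 : PySem.Int.floordiv (PySem.Int.floordiv i 243) 3 = PySem.Int.floordiv i 729 := by
    rw [pvFdFd i 243 3 (by norm_num) (by norm_num)]; norm_num
  have e6 : PySem.Int.floordiv (PySem.Int.floordiv i 729) 3 = PySem.Int.floordiv i 2187 := by
    rw [pvFdFd i 729 3 (by norm_num) (by norm_num)]; norm_num
  simp only [pvPairs]
  rw [e1, e2, e3, e4, e5, e6]

-- B's expression string renders pvPairs
theorem pvExprB_toList (i : Int) :
    (pvExprB i).toList = pvChars (pvPairs [1, 2, 3, 4, 5, 6, 7, 8] i) ++ ['9'] := by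
  rw [pvPairs8]
  have h1 : PySem.Int.floordiv i 1 = i := by
    rw [PySem.Int.floordiv_eq_ediv_of_pos (by norm_num)]; exact Int.ediv_one i
  have hnil : "".toList = ([] : List Char) := by simp
  have h9l : "9".toList = ['9'] := by simp
  simp only [pvExprB, pvRange19, List.map_cons, List.map_nil, String.toList_append,
    PySem.Str.toList_join, PySem.Chars.join, List.intercalate, List.intersperse,
    List.flatten, PySem.Int.toList_toStr, pvChars, hnil, h9l, pvElem,
    List.append_assoc, List.append_nil]
  have t2 : ((3:Int) ^ Int.toNat 2) = 9 := by decide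
  have t3 : ((3:Int) ^ Int.toNat 3) = 27 := by decide
  have t4 : ((3:Int) ^ Int.toNat 4) = 81 := by decide
  have t5 : ((3:Int) ^ Int.toNat 5) = 243 := by decide
  have t6 : ((3:Int) ^ Int.toNat 6) = 729 := by decide
  have t7 : ((3:Int) ^ Int.toNat 7) = 2187 := by decide
  norm_num [pvElem, t2, t3, t4, t5, t6, t7]

-- A's string-building fold renders pvPairs too
theorem pvBuildFold (toks : List Int) : ∀ (s : String) (id_ : Int),
    ((toks.foldl pvStepBuild (s, id_)).1).toList = s.toList ++ pvChars (pvPairs toks id_) := by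
  induction toks with
  | nil => intro s id_; simp [pvPairs, pvChars]
  | cons t ts ih =>
    intro s id_
    have hop : (if PySem.Int.mod id_ 3 = 0 then "" else if PySem.Int.mod id_ 3 = 1 then "+" else "-").toList
        = (if PySem.Int.mod id_ 3 = 0 then ([] : List Char) else if PySem.Int.mod id_ 3 = 1 then ['+'] else ['-']) := by
      split_ifs <;> decide
    simp only [List.foldl_cons, pvStepBuild, pvPairs, pvChars, ih, String.toList_append,
      PySem.Int.toList_toStr, hop, List.append_assoc]

theorem pvBuildA_eq (i : Int) : pvBuildA i = pvExprB i := by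
  apply String.ext
  rw [pvExprB_toList]
  simp only [pvBuildA, pvRange19, String.toList_append, pvBuildFold]
  simp

-- pvPairs over all nine tokens, for i in range(6561): the ninth digit is 0
theorem pvPairs9 (i : Int) (h0 : 0 ≤ i) (h1 : i < 6561) :
    pvPairs [1, 2, 3, 4, 5, 6, 7, 8, 9] i
      = pvPairs [1, 2, 3, 4, 5, 6, 7, 8] i ++ [(9, 0)] := by
  have hq : PySem.Int.floordiv i 6561 = 0 := by
    rw [PySem.Int.floordiv_eq_ediv_of_pos (by norm_num)]
    exact Int.ediv_eq_zero_of_lt h0 (by omega)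
  have e7 : PySem.Int.floordiv (PySem.Int.floordiv i 2187) 3 = PySem.Int.floordiv i 6561 := by
    rw [pvFdFd i 2187 3 (by norm_num) (by norm_num)]; norm_num
  have h9 : PySem.Int.mod (PySem.Int.floordiv (PySem.Int.floordiv i 2187) 3) 3 = 0 := by
    rw [e7, hq]; decide
  have e1 : PySem.Int.floordiv (PySem.Int.floordiv i 3) 3 = PySem.Int.floordiv i 9 := by
    rw [pvFdFd i 3 3 (by norm_num) (by norm_num)]; norm_num
  have e2 : PySem.Int.floordiv (PySem.Int.floordiv i 9) 3 = PySem.Int.floordiv i 27 := by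
    rw [pvFdFd i 9 3 (by norm_num) (by norm_num)]; norm_num
  have e3 : PySem.Int.floordiv (PySem.Int.floordiv i 27) 3 = PySem.Int.floordiv i 81 := by
    rw [pvFdFd i 27 3 (by norm_num) (by norm_num)]; norm_num
  have e4 : PySem.Int.floordiv (PySem.Int.floordiv i 81) 3 = PySem.Int.floordiv i 243 := by
    rw [pvFdFd i 81 3 (by norm_num) (by norm_num)]; norm_num
  have e5 : PySem.Int.floordiv (PySem.Int.floordiv i 243) 3 = PySem.Int.floordiv i 729 := by
    rw [pvFdFd i 243 3 (by norm_num) (by norm_num)]; norm_num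
  have e6 : PySem.Int.floordiv (PySem.Int.floordiv i 729) 3 = PySem.Int.floordiv i 2187 := by
    rw [pvFdFd i 729 3 (by norm_num) (by norm_num)]; norm_num
  have hm0 : PySem.Int.mod 0 3 = 0 := by decide
  simp only [pvPairs, List.cons_append, List.nil_append]
  rw [e1, e2, e3, e4, e5, e6, e7, hq, hm0]

-- both values agree for every id in range(6561)
theorem pvVal (i : Int) (h0 : 0 ≤ i) (h1 : i < 6561) : find_subset i = pvEval (pvExprB i) := by
  have hbounds : ∀ p ∈ pvPairs [1, 2, 3, 4, 5, 6, 7, 8] i,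
      (1 ≤ p.1 ∧ p.1 ≤ 9) ∧ (0 ≤ p.2 ∧ p.2 < 3) := by
    rw [pvPairs8]
    intro p hp
    simp only [List.mem_cons, List.not_mem_nil, or_false] at hp
    rcases hp with h|h|h|h|h|h|h|h <;>
      · subst h
        exact ⟨by norm_num, pvMod3_bounds _⟩
  unfold find_subset pvEval
  rw [pvRange110, pvFoldA [1,2,3,4,5,6,7,8,9] 0 0 1 i (Or.inl rfl), pvPairs9 i h0 h1,
    pvRunAppend, pvExprB_toList, pvEvalRun _ 0 0 1 hbounds]
  have hif : (if (1:Int) = 2 then (-1:Int) else 1) = 1 := by norm_num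
  rw [hif]
  set X := pvRun (pvPairs [1, 2, 3, 4, 5, 6, 7, 8] i) (0, 0, 1) with hX
  clear_value X
  obtain ⟨a, b, c⟩ := X
  simp [pvRun, pvFin]

theorem pvLoop_eq (natural : Int) : ∀ (l : List Int),
    (∀ i ∈ l, 0 ≤ i ∧ i < 6561) → pvLoopA natural l = pvLoopB natural l := by
  intro l
  induction l with
  | nil => intro _; rfl
  | cons i rest ih =>
    intro h
    obtain ⟨h0, h1⟩ := h i (List.mem_cons_self ..)
    have hv := pvVal i h0 h1
    have hb := pvBuildA_eq i
    simp only [pvLoopA, pvLoopB, hv, hb]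
    split <;> [rfl; exact ih fun j hj => h j (List.mem_cons_of_mem _ hj)]

-- ===== VERDICT (by name: the statement is the Claim_ definition above) =====
theorem single_solution_spec : Claim_equal_single_solution := by
  intro natural _
  unfold Spec_single_solution single_solution single_solution_alt
  exact pvLoop_eq natural _ (fun i hi => by
    have := PySem.List.mem_pyRange_one.mp hi
    omega)
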